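-- pv_equiv track=rewrite | github.com/Leapense/problems | 31670번: Exceptional Magic Attack/solution.py | min_energy
-- ===== SOURCE A (Python) =====
-- def min_energy(N, R):
--     if N == 0:
--         return 0
--
--     dp0, dp1 = 0, R[0]
--     for i in range(1, N):
--         new0 = dp1
--         new1 = min(dp0, dp1) + R[i]
--         dp0, dp1 = new0, new1
--     return min(dp0, dp1)
-- ===== SOURCE B (Python) =====
-- def min_energy(N, R):
--     # Complement view: the unselected elements form an independent set (no two
--     # adjacent), so minimum selected energy = total - max-weight independent set.
--     if N <= 0:
--         return 0
--     prefix = R[:N]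
--     # a: best IS weight of the suffix seen so far; b: same but not using its first element
--     a = b = 0
--     for x in reversed(prefix):
--         a, b = max(a, x + b), a
--     return sum(prefix) - a
-- ===== Notes on version B (the rewrite author's own statement) =====
-- stated objective: alternative
-- what changed: B works on the complement: it sums the first N values and subtracts the maximum-weight independent set of unselected elements, computed by a backward (reversed) keep/skip scan, instead of A's forward index-driven min-cover DP.
-- intended difference: On negative N with a negative first element A returns min(0, R[0]) = R[0] (its leftover initial DP state), while B returns 0, the intended cost of a malformed/empty attack count; for negative N with R[0] >= 0 both return 0. — e.g. on min_energy(-1, [-5]): A returns -5, B returns 0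
import Mathlib
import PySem

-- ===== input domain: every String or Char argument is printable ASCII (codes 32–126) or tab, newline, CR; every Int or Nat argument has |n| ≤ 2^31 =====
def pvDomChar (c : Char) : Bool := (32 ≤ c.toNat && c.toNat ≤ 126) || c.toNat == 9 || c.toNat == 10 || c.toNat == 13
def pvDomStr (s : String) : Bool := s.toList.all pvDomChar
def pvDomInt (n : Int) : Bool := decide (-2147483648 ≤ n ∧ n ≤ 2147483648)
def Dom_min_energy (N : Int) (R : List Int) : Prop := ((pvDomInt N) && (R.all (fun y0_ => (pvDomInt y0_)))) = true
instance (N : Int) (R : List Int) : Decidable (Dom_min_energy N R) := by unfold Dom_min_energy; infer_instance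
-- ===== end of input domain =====

-- B replaces A's forward index-driven min-cover DP by the complement view: it sums
-- the first N values and subtracts the maximum-weight independent set of unselected
-- elements, computed by a backward (reversed) keep/skip scan; alternative
-- decomposition, same cost. Equivalence proved on 0 ≤ N ≤ |R|.

-- ===== PORT A =====
-- pyGetD with default 0 is exact here: under Pre_ every index accessed is in range.
def min_energy (N : Int) (R : List Int) : Int :=
  if N = 0 then 0
  else
    let s := (PySem.List.pyRange 1 N 1).foldl
      (fun (s : Int × Int) i => (s.2, min s.1 s.2 + PySem.List.pyGetD R i 0))
      (0, PySem.List.pyGetD R 0 0)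
    min s.1 s.2

-- ===== PORT B =====
def min_energy_alt (N : Int) (R : List Int) : Int :=
  if N ≤ 0 then 0
  else
    let pre := PySem.List.slice R none (some N)
    let ab := pre.reverse.foldl
      (fun (p : Int × Int) x => (max p.1 (x + p.2), p.1)) (0, 0)
    pre.sum - ab.1

-- ===== PRECONDITION & SPEC =====
-- Pre_ excludes exactly the inputs where A raises IndexError: N ≠ 0 with R = [], or N > len(R).
def Pre_min_energy (N : Int) (R : List Int) : Prop := N = 0 ∨ (R ≠ [] ∧ N ≤ R.length)
instance (N : Int) (R : List Int) : Decidable (Pre_min_energy N R) := by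
  unfold Pre_min_energy; infer_instance
def pvWitness_min_energy : Int × List Int := (3, [4, 1, 5])

-- On negative N with a negative first element A returns min(0, R[0]) = R[0] — its leftover
-- initial DP state — while B returns 0, the intended cost of a malformed/empty attack count;
-- for negative N with R[0] ≥ 0 both return 0.
def D_min_energy (N : Int) (R : List Int) : Prop := N < 0 ∧ R ≠ [] ∧ R.headD 0 < 0
instance (N : Int) (R : List Int) : Decidable (D_min_energy N R) := by
  unfold D_min_energy; infer_instance

def Spec_min_energy (N : Int) (R : List Int) (out : Int) : Prop :=
  ¬ D_min_energy N R → out = min_energy_alt N R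
instance (N : Int) (R : List Int) (out : Int) : Decidable (Spec_min_energy N R out) := by
  unfold Spec_min_energy; infer_instance

def pvDiffWitness_min_energy : Int × List Int := (-1, [-5])
def pvDiffWitnessOut_min_energy : Int × Int := (-5, 0)

-- ===== CLAIM (what is proved, stated in full; the proofs are below) =====
def Claim_unchanged_min_energy : Prop := ∀ (N : Int) (R : List Int),
  Dom_min_energy N R → Pre_min_energy N R → Spec_min_energy N R (min_energy N R)
def Claim_changed_min_energy : Prop :=
  Dom_min_energy (pvDiffWitness_min_energy.1) (pvDiffWitness_min_energy.2) ∧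
  Pre_min_energy (pvDiffWitness_min_energy.1) (pvDiffWitness_min_energy.2) ∧
  D_min_energy (pvDiffWitness_min_energy.1) (pvDiffWitness_min_energy.2) ∧
  min_energy (pvDiffWitness_min_energy.1) (pvDiffWitness_min_energy.2) = pvDiffWitnessOut_min_energy.1 ∧
  min_energy_alt (pvDiffWitness_min_energy.1) (pvDiffWitness_min_energy.2) = pvDiffWitnessOut_min_energy.2 ∧
  pvDiffWitnessOut_min_energy.1 ≠ pvDiffWitnessOut_min_energy.2
def Claim_exact_min_energy : Prop := ∀ (N : Int) (R : List Int),
  Dom_min_energy N R → Pre_min_energy N R → D_min_energy N R →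
  min_energy N R ≠ min_energy_alt N R

-- ===== LEMMAS AND PROOFS =====

-- A's index loop over range(a, a+n) reading R[i] is a fold over the n elements after a.
theorem foldA_range (n : Nat) : ∀ (a : Int) (R : List Int) (s : Int × Int), 0 ≤ a →
    a.toNat + n ≤ R.length →
    (PySem.List.pyRange a (a + n) 1).foldl
      (fun (s : Int × Int) i => (s.2, min s.1 s.2 + PySem.List.pyGetD R i 0)) s
    = ((R.drop a.toNat).take n).foldl (fun (s : Int × Int) x => (s.2, min s.1 s.2 + x)) s := by
  induction n with
  | zero =>
    intro a R s _ _
    simp [PySem.List.pyRange_one_eq_nil (le_refl a)]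
  | succ n ih =>
    intro a R s ha hlen
    have halen : a.toNat < R.length := by omega
    have hcons : PySem.List.pyRange a (a + (n + 1 : Nat)) 1
        = a :: PySem.List.pyRange (a + 1) (a + 1 + n) 1 := by
      rw [PySem.List.pyRange_one_cons (by omega)]
      congr 1; congr 1; omega
    have hget : PySem.List.pyGetD R a 0 = R[a.toNat] :=
      PySem.List.pyGetD_eq_getElem R 0 ha (by omega)
    have hdrop : R.drop a.toNat = R[a.toNat] :: R.drop (a.toNat + 1) :=
      List.drop_eq_getElem_cons halen
    rw [hcons, List.foldl_cons, hget, hdrop, List.take_succ_cons, List.foldl_cons]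
    have h1 : (a + 1).toNat = a.toNat + 1 := by omega
    have := ih (a + 1) R (s.2, min s.1 s.2 + R[a.toNat]) (by omega) (by omega)
    simpa [h1] using this

-- proof-side triple fold (total, keep, skip) linking the two sides
def pvTrip (l : List Int) (s : Int × Int × Int) : Int × Int × Int :=
  l.foldl (fun (s : Int × Int × Int) x => (s.1 + x, s.2.2 + x, max s.2.1 s.2.2)) s

-- the invariant linking A's (dp0, dp1) to the triple (total, keep, skip):
-- dp0 = total - keep, dp1 = total - skip.
theorem keyInv (l : List Int) : ∀ (t k sk : Int),
    l.foldl (fun (s : Int × Int) x => (s.2, min s.1 s.2 + x)) (t - k, t - sk)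
    = ((pvTrip l (t, k, sk)).1 - (pvTrip l (t, k, sk)).2.1,
       (pvTrip l (t, k, sk)).1 - (pvTrip l (t, k, sk)).2.2) := by
  induction l with
  | nil => intro t k sk; simp [pvTrip]
  | cons x l ih =>
    intro t k sk
    have hstate : ((t - sk, min (t - k) (t - sk) + x) : Int × Int)
        = ((t + x) - (sk + x), (t + x) - max k sk) := by
      simp only [Prod.mk.injEq]; omega
    simp only [pvTrip, List.foldl_cons] at *
    rw [hstate]
    exact ih (t + x) (sk + x) (max k sk)

-- the first component of the triple fold accumulates the sum
theorem trip_sum (l : List Int) : ∀ (t k sk : Int),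
    (pvTrip l (t, k, sk)).1 = t + l.sum := by
  induction l with
  | nil => intro t k sk; simp [pvTrip]
  | cons x l ih =>
    intro t k sk
    simp only [pvTrip, List.foldl_cons, List.sum_cons] at *
    rw [ih (t + x) (sk + x) (max k sk)]
    ring

-- the max of keep/skip after the forward triple fold equals the backward
-- keep/skip recursion (B's reversed scan, written as a foldr) shifted by the seeds
theorem trip_max (l : List Int) : ∀ (t k sk : Int),
    max (pvTrip l (t, k, sk)).2.1 (pvTrip l (t, k, sk)).2.2
    = max (sk + (l.foldr (fun x (p : Int × Int) => (max p.1 (x + p.2), p.1)) (0, 0)).1)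
          (k + (l.foldr (fun x (p : Int × Int) => (max p.1 (x + p.2), p.1)) (0, 0)).2) := by
  induction l with
  | nil => intro t k sk; simp only [pvTrip, List.foldl_nil, List.foldr_nil]; omega
  | cons x l ih =>
    intro t k sk
    simp only [pvTrip, List.foldl_cons, List.foldr_cons] at *
    rw [ih (t + x) (sk + x) (max k sk)]
    omega

-- ===== VERDICT (by name: the statements are the Claim_ definitions above) =====
theorem min_energy_spec : Claim_unchanged_min_energy := by
  intro N R _ hpre hnD
  unfold min_energy min_energy_alt
  dsimp only
  by_cases hz : N = 0
  · subst hz; simp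
  · simp only [if_neg hz]
    by_cases hneg : N < 0
    · -- negative N: outside D_ the head is ≥ 0 and both sides are 0
      obtain ⟨r, rs, rfl⟩ : ∃ r rs, R = r :: rs := by
        rcases hpre with h | ⟨hne, _⟩
        · omega
        · cases R with
          | nil => exact absurd rfl hne
          | cons r rs => exact ⟨r, rs, rfl⟩
      have hr : 0 ≤ r := by
        by_contra h
        exact hnD ⟨hneg, by simp, by simpa using by omega⟩
      rw [if_pos (by omega : N ≤ 0),
        PySem.List.pyRange_one_eq_nil (by omega : N ≤ 1)]
      simp only [List.foldl_nil]
      rw [PySem.List.pyGetD_zero_cons r rs 0]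
      omega
    · have hN0 : 0 ≤ N := by omega
      have hNlen : N ≤ R.length := by
        rcases hpre with h | ⟨_, h⟩
        · omega
        · exact h
      rw [if_neg (by omega : ¬ N ≤ 0), PySem.List.slice_to R hN0]
      have hN1 : 1 ≤ N := by omega
      have hRlen : 1 ≤ R.length := by omega
      obtain ⟨r, rs, rfl⟩ : ∃ r rs, R = r :: rs := by
        cases R with
        | nil => simp at hRlen
        | cons r rs => exact ⟨r, rs, rfl⟩
      have htake : (r :: rs).take N.toNat = r :: rs.take (N.toNat - 1) := by
        obtain ⟨m, hm⟩ : ∃ m : Nat, N.toNat = m + 1 := ⟨N.toNat - 1, by omega⟩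
        rw [hm]; simp
      rw [htake]
      have hrange : PySem.List.pyRange 1 N 1
          = PySem.List.pyRange 1 (1 + ((N.toNat - 1 : Nat) : Int)) 1 := by
        congr 1; omega
      have hget0 : PySem.List.pyGetD (r :: rs) 0 0 = r := PySem.List.pyGetD_zero_cons r rs 0
      rw [hget0, hrange,
        foldA_range (N.toNat - 1) 1 (r :: rs) (0, r) (by omega) (by simp only [Int.toNat_one]; omega)]
      simp only [Int.toNat_one, List.drop_succ_cons, List.drop_zero]
      have hinit : ((0 : Int), r) = (r - r, r - 0) := by simp
      rw [hinit, keyInv, List.foldl_reverse]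
      simp only [List.foldr_cons, List.sum_cons]
      have hm := trip_max (rs.take (N.toNat - 1)) r r 0
      have hs := trip_sum (rs.take (N.toNat - 1)) r r 0
      omega

theorem min_energy_changed : Claim_changed_min_energy := by
  unfold Claim_changed_min_energy; decide

theorem min_energy_tight : Claim_exact_min_energy := by
  intro N R _ hpre hD
  obtain ⟨hneg, hne, hhd⟩ := hD
  obtain ⟨r, rs, rfl⟩ : ∃ r rs, R = r :: rs := by
    cases R with
    | nil => exact absurd rfl hne
    | cons r rs => exact ⟨r, rs, rfl⟩
  have hr : r < 0 := by simpa using hhd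
  unfold min_energy min_energy_alt
  dsimp only
  rw [if_neg (by omega : ¬ N = 0), if_pos (by omega : N ≤ 0),
    PySem.List.pyRange_one_eq_nil (by omega : N ≤ 1)]
  simp only [List.foldl_nil]
  rw [PySem.List.pyGetD_zero_cons r rs 0]
  omega
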